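-- pv_equiv track=rewrite | github.com/anwenyi/result_filter | data_processor_refactored.py | filter_info
-- ===== SOURCE A (Python) =====
-- def filter_info(data):
--     resultDict={}
--
--     LEGAL_LINE_LENGTH = 7
--     INDEX_OF_SALARY = 5
--     INDEX_OF_EMPLOYEE_ID = 1
--
--     '''Skip the header of the file.'''
--     for line in data[1:]:
--         words = line.split(",")
--
--         if len(words)!=LEGAL_LINE_LENGTH:
--             continue
--
--         if words[INDEX_OF_EMPLOYEE_ID] not in resultDict:
--         	resultDict[words[INDEX_OF_EMPLOYEE_ID]]=line
--         else:
--             oldWords = resultDict.get(words[INDEX_OF_EMPLOYEE_ID]).split(",")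
--
--             if int(words[INDEX_OF_SALARY])> int(oldWords[INDEX_OF_SALARY]):
--                 resultDict[str(words[INDEX_OF_EMPLOYEE_ID])]=line
--     return resultDict
-- ===== SOURCE B (Python) =====
-- def filter_info(data):
--     '''Group the records by employee ID, then keep one line per group.'''
--     groups = {}
--     for line in data[1:]:
--         words = line.split(",")
--         if len(words) != 7:
--             continue
--         groups.setdefault(words[1], []).append(line)
--
--     resultDict = {}
--     for emp_id, lines in groups.items():
--         if len(lines) == 1:
--             resultDict[emp_id] = lines[0]
--         else:
--             resultDict[emp_id] = max(lines, key=lambda l: int(l.split(",")[5]))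
--     return resultDict
-- ===== Notes on version B (the rewrite author's own statement) =====
-- stated objective: alternative
-- what changed: A keeps a running best line per employee ID in one dict with an inline strictly-greater replacement; B first groups all valid lines by employee ID and then picks each group's representative in a second pass (the single line directly for singleton groups, which A never salary-parses, otherwise max(..., key=salary), whose first-maximal tie rule matches A's strict replacement). Pre_ excludes inputs where an ID with two or more 7-field lines has an unparseable salary field, on which both A and B raise ValueError.
import Mathlib
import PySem

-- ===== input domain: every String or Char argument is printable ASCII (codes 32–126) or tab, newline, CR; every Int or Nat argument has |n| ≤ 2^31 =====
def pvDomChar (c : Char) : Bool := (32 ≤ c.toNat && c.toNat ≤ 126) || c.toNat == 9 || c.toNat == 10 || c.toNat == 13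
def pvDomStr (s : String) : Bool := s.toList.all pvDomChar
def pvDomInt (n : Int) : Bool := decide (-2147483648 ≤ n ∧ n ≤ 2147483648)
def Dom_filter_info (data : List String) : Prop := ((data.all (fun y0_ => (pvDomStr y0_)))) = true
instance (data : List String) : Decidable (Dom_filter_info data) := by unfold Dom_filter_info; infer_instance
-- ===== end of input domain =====

-- B replaces A's single running-best dict by a group-by-ID pass followed by a per-group max pass; same cost, different shape.

-- ===== PORT A =====
-- A's per-line dict update: insert an unseen ID, otherwise replace the stored line on strictly greater salary.
-- (the `.getD 0` after PySem.Int.ofStr? marks exactly where Python's int() would raise ValueError; Pre_ excludes those inputs)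
def pvStepA (resultDict : PySem.Dict String String) (line : String) : PySem.Dict String String :=
  let words := (PySem.Str.split? line ",").getD []
  if words.length ≠ 7 then resultDict
  else if resultDict.contains (words.getD 1 "") = false then
    resultDict.insert (words.getD 1 "") line
  else
    let oldWords := (PySem.Str.split? ((resultDict.get? (words.getD 1 "")).getD "") ",").getD []
    if (PySem.Int.ofStr? (words.getD 5 "")).getD 0 > (PySem.Int.ofStr? (oldWords.getD 5 "")).getD 0 then
      resultDict.insert (words.getD 1 "") line
    else resultDict

def filter_info (data : List String) : List (String × String) :=
  ((data.drop 1).foldl pvStepA PySem.Dict.empty).items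

-- ===== PORT B =====
-- B's salary key for max(…, key=…)  (the `.getD 0` marks where Python's int() raises; excluded by Pre_)
def pvSal (l : String) : Int := (PySem.Int.ofStr? (((PySem.Str.split? l ",").getD []).getD 5 "")).getD 0

-- B's grouping step: groups.setdefault(words[1], []).append(line)
def pvStepB (g : PySem.Dict String (List String)) (line : String) : PySem.Dict String (List String) :=
  let words := (PySem.Str.split? line ",").getD []
  if words.length ≠ 7 then g
  else g.modify (words.getD 1 "") [] (fun ls => ls ++ [line])

def filter_info_alt (data : List String) : List (String × String) :=
  let groups := (data.drop 1).foldl pvStepB PySem.Dict.empty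
  groups.items.map (fun p =>
    match p.2 with
    | [l] => (p.1, l)
    | ls => (p.1, (PySem.List.max? ls pvSal).getD ""))

-- ===== PRECONDITION & SPEC =====
def pvWords (l : String) : List String := (PySem.Str.split? l ",").getD []
-- Pre_ excludes exactly the inputs on which Python A raises ValueError: an employee ID owning at least
-- two well-formed (7-field) lines one of whose salary fields is not a valid int literal (B raises there too).
def Pre_filter_info (data : List String) : Prop :=
  ∀ l ∈ (data.drop 1).filter (fun l' => (pvWords l').length == 7),
    2 ≤ ((data.drop 1).filter (fun l' => (pvWords l').length == 7)).countP
          (fun l' => (pvWords l').getD 1 "" == (pvWords l).getD 1 "") →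
    (PySem.Int.ofStr? ((pvWords l).getD 5 "")).isSome = true
instance (data : List String) : Decidable (Pre_filter_info data) := by unfold Pre_filter_info; infer_instance
def pvWitness_filter_info : List String :=
  ["name,id,a,b,c,salary,d", "ann,7,x,y,z,10,q", "bob,8,x,y,z,5,q", "ann2,7,x,y,z,30,q"]
def Spec_filter_info (data : List String) (out : List (String × String)) : Prop := out = filter_info_alt data
instance (data : List String) (out : List (String × String)) : Decidable (Spec_filter_info data out) := by unfold Spec_filter_info; infer_instance

-- ===== CLAIM (what is proved, stated in full; the proofs are below) =====
def Claim_equal_filter_info : Prop := ∀ (data : List String), Dom_filter_info data → Pre_filter_info data → Spec_filter_info data (filter_info data)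

-- ===== LEMMAS AND PROOFS =====

-- A's sequential replace-on-strictly-greater over a group, seeded with its first line.
def pvRed (ls : List String) : String :=
  match ls with
  | [] => ""
  | h :: t => t.foldl (fun m x => if pvSal m < pvSal x then x else m) h

lemma pvMax?_cons (h : String) (t : List String) :
    PySem.List.max? (h :: t) pvSal = some (pvRed (h :: t)) := by
  induction t generalizing h with
  | nil => simp [PySem.List.max?, pvRed]
  | cons x t ih =>
      have hL : PySem.List.max? (h :: x :: t) pvSal
          = PySem.List.max? ((if pvSal h < pvSal x then x else h) :: t) pvSal := by
        simp only [PySem.List.max?, List.foldl_cons]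
        by_cases hc : pvSal h < pvSal x <;> simp [hc]
      have hR : pvRed (h :: x :: t) = pvRed ((if pvSal h < pvSal x then x else h) :: t) := by
        simp only [pvRed, List.foldl_cons]
      rw [hL, hR, ih]

lemma pvStepB_ne_nil (L : List String) (g : PySem.Dict String (List String))
    (hne : ∀ p ∈ g.items, p.2 ≠ []) :
    ∀ p ∈ (L.foldl pvStepB g).items, p.2 ≠ [] := by
  induction L generalizing g with
  | nil => exact hne
  | cons line L ih =>
      simp only [List.foldl_cons]
      apply ih
      by_cases h7 : ((PySem.Str.split? line ",").getD []).length ≠ 7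
      · have hB : pvStepB g line = g := by simp only [pvStepB, if_pos h7]
        rw [hB]; exact hne
      · have hB : pvStepB g line
            = g.insert (((PySem.Str.split? line ",").getD []).getD 1 "")
                (g.getD (((PySem.Str.split? line ",").getD []).getD 1 "") [] ++ [line]) := by
          simp only [pvStepB, if_neg h7, PySem.Dict.modify]
        rw [hB]
        intro p hp
        rcases (PySem.Dict.mem_items_insert g _ _ p).1 hp with h | h
        · subst h; simp
        · exact hne p h.1

lemma pvInvariant (L : List String) (d : PySem.Dict String String)
    (g : PySem.Dict String (List String))
    (hkeys : g.keys.Nodup)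
    (hrel : d.items = g.items.map (fun p => (p.1, pvRed p.2)))
    (hne : ∀ p ∈ g.items, p.2 ≠ []) :
    (L.foldl pvStepA d).items
      = (L.foldl pvStepB g).items.map (fun p => (p.1, pvRed p.2)) := by
  induction L generalizing d g with
  | nil => exact hrel
  | cons line L ih =>
      simp only [List.foldl_cons]
      have hdkeys : d.keys = g.keys := by
        simp only [PySem.Dict.keys, hrel, List.map_map]; rfl
      have hdnodup : d.keys.Nodup := hdkeys ▸ hkeys
      by_cases h7 : ((PySem.Str.split? line ",").getD []).length ≠ 7
      · -- malformed line: both steps skip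
        have hA : pvStepA d line = d := by simp only [pvStepA, if_pos h7]
        have hB : pvStepB g line = g := by simp only [pvStepB, if_pos h7]
        rw [hA, hB]; exact ih d g hkeys hrel hne
      · set k := ((PySem.Str.split? line ",").getD []).getD 1 "" with hk
        by_cases hc : g.contains k = true
        · -- known ID: A compares salaries, B appends to the group
          obtain ⟨ls, hls⟩ : ∃ ls, (k, ls) ∈ g.items := by
            have hmem := (PySem.Dict.contains_iff_mem_keys g k).1 hc
            simp only [PySem.Dict.keys, List.mem_map] at hmem
            obtain ⟨p, hp, hpk⟩ := hmem
            exact ⟨p.2, by simpa [← hpk] using hp⟩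
          have hlsne : ls ≠ [] := hne _ hls
          have hget : g.getD k [] = ls := PySem.Dict.getD_of_mem_items g hls hkeys []
          have hdc : d.contains k = true := by
            rw [PySem.Dict.contains_iff_mem_keys, hdkeys]
            exact (PySem.Dict.contains_iff_mem_keys g k).1 hc
          have hdget : d.get? k = some (pvRed ls) := by
            apply PySem.Dict.get?_of_mem_items d _ hdnodup
            rw [hrel]
            exact List.mem_map_of_mem hls
          -- the key fact: appending a line to a group pushes pvRed one step
          have hred : pvRed (ls ++ [line])
              = if pvSal (pvRed ls) < pvSal line then line else pvRed ls := by
            obtain ⟨h, t, rfl⟩ := List.exists_cons_of_ne_nil hlsne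
            simp [pvRed, List.foldl_append]
          have hB : pvStepB g line = g.insert k (ls ++ [line]) := by
            simp only [pvStepB, if_neg h7, PySem.Dict.modify, ← hk, hget]
          have huniq : ∀ p ∈ g.items, p.1 = k → p.2 = ls := by
            intro p hp hpk
            have h1 : g.get? p.1 = some p.2 :=
              PySem.Dict.get?_of_mem_items g (by simpa using hp) hkeys
            have h2 : g.get? k = some ls := PySem.Dict.get?_of_mem_items g hls hkeys
            rw [hpk, h2] at h1
            exact (Option.some.injEq _ _ ▸ h1).symm
          have hA : pvStepA d line
              = if pvSal (pvRed ls) < pvSal line then d.insert k line else d := by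
            simp only [pvStepA, if_neg h7, ← hk, hdc, Bool.true_eq_false, if_false, hdget,
              Option.getD_some, gt_iff_lt]
            rfl
          rw [hA, hB]
          have hkeys' : (g.insert k (ls ++ [line])).keys.Nodup :=
            PySem.Dict.nodup_keys_insert g k _ hkeys
          have hne' : ∀ p ∈ (g.insert k (ls ++ [line])).items, p.2 ≠ [] := by
            intro p hp
            rcases (PySem.Dict.mem_items_insert g _ _ p).1 hp with h | h
            · subst h; simp
            · exact hne p h.1
          have hrel' : (if pvSal (pvRed ls) < pvSal line then d.insert k line else d).items
              = (g.insert k (ls ++ [line])).items.map (fun p => (p.1, pvRed p.2)) := by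
            rw [PySem.Dict.items_insert_of_contains g _ hc, List.map_map]
            by_cases hcmp : pvSal (pvRed ls) < pvSal line
            · rw [if_pos hcmp, PySem.Dict.items_insert_of_contains d _ hdc, hrel, List.map_map]
              apply List.map_congr_left
              intro p hp
              by_cases hpk : p.1 = k
              · simp [Function.comp, hpk, hred, hcmp]
              · simp [Function.comp, hpk]
            · rw [if_neg hcmp, hrel]
              apply List.map_congr_left
              intro p hp
              by_cases hpk : p.1 = k
              · simp [Function.comp, hpk, hred, hcmp, huniq p hp hpk]
              · simp [Function.comp, hpk]
          exact ih _ _ hkeys' hrel' hne'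
        · -- fresh ID: both sides append a new entry
          have hcf : g.contains k = false := by simpa using hc
          have hdcf : d.contains k = false := by
            rw [← Bool.not_eq_true] at hcf ⊢
            rw [PySem.Dict.contains_iff_mem_keys, hdkeys]
            rwa [PySem.Dict.contains_iff_mem_keys] at hcf
          have hA : pvStepA d line = d.insert k line := by
            simp only [pvStepA, if_neg h7, ← hk, hdcf, if_true]
          have hB : pvStepB g line = g.insert k [line] := by
            simp only [pvStepB, if_neg h7, PySem.Dict.modify, ← hk]
            rw [PySem.Dict.getD_of_not_contains g [] hcf, List.nil_append]
          rw [hA, hB]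
          have hkeys' : (g.insert k [line]).keys.Nodup := PySem.Dict.nodup_keys_insert g k _ hkeys
          have hne' : ∀ p ∈ (g.insert k [line]).items, p.2 ≠ [] := by
            intro p hp
            rcases (PySem.Dict.mem_items_insert g _ _ p).1 hp with h | h
            · subst h; simp
            · exact hne p h.1
          have hrel' : (d.insert k line).items
              = (g.insert k [line]).items.map (fun p => (p.1, pvRed p.2)) := by
            rw [PySem.Dict.items_insert_of_not_contains d _ hdcf,
                PySem.Dict.items_insert_of_not_contains g _ hcf, List.map_append, hrel]
            rfl
          exact ih _ _ hkeys' hrel' hne'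

-- ===== VERDICT (by name: the statement is the Claim_ definition above) =====
theorem filter_info_spec : Claim_equal_filter_info := by
  intro data _ _
  show filter_info data = filter_info_alt data
  unfold filter_info filter_info_alt
  rw [pvInvariant (data.drop 1) PySem.Dict.empty PySem.Dict.empty
      (by simp [PySem.Dict.keys_empty]) (by rfl) (by intro p hp; simp [PySem.Dict.empty] at hp)]
  apply List.map_congr_left
  intro p hp
  have hne : p.2 ≠ [] := pvStepB_ne_nil (data.drop 1) PySem.Dict.empty
      (by intro q hq; simp [PySem.Dict.empty] at hq) p hp
  match hmatch : p.2 with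
  | [] => exact absurd hmatch hne
  | [l] => simp [pvRed]
  | l1 :: l2 :: t => simp [pvMax?_cons]
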